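-- pv_equiv track=rewrite | github.com/FreddyMachaca/INF-111 | LABORATORIOS/LABORATORIO2/Ejercicio6/Python/Secuencia.py | calcular_suma_secuencia
-- ===== SOURCE A (Python) =====
-- def calcular_suma_secuencia(n):
--     suma = 0
--     multiplicador = 1
--
--     for i in range(1, n + 1):
--         termino = i * multiplicador
--         suma += termino
--         multiplicador *= -2
--
--     return suma
-- ===== SOURCE B (Python) =====
-- def calcular_suma_secuencia(n):
--     if n <= 0:
--         return 0
--     p = (-2) ** n
--     return (1 - (n + 1) * p - 2 * n * p) // 9
-- ===== Notes on version B (the rewrite author's own statement) =====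
-- stated objective: faster
-- what changed: Replaced the O(n) accumulation loop by the closed-form arithmetic-geometric series formula (1-(n+1)p-2np)//9 with p=(-2)**n computed by fast exponentiation.
import Mathlib
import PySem

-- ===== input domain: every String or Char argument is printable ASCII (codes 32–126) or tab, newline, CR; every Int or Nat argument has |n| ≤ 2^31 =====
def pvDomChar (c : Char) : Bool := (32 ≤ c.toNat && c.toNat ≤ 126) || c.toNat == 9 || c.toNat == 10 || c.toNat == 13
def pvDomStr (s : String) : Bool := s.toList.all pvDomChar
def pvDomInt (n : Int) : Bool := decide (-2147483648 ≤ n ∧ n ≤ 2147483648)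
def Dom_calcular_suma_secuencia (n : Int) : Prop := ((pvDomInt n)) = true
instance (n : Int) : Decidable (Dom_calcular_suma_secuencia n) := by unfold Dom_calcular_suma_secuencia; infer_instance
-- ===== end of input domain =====

-- B replaces A's O(n) accumulation loop by the closed-form series formula with one fast power (objective: faster, asymptotic).

-- ===== PORT A =====
def calcular_suma_secuencia (n : Int) : Int :=
  let st := (PySem.List.pyRange 1 (n + 1) 1).foldl
    (fun (st : Int × Int) i =>
      let termino := i * st.2
      (st.1 + termino, st.2 * (-2))) (0, 1)
  st.1

-- ===== PORT B =====
def calcular_suma_secuencia_alt (n : Int) : Int :=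
  if n ≤ 0 then 0
  else
    let p := (-2 : Int) ^ n.toNat
    PySem.Int.floordiv (1 - (n + 1) * p - 2 * n * p) 9

-- ===== PRECONDITION & SPEC =====
def Spec_calcular_suma_secuencia (n : Int) (out : Int) : Prop := out = calcular_suma_secuencia_alt n
instance (n : Int) (out : Int) : Decidable (Spec_calcular_suma_secuencia n out) := by unfold Spec_calcular_suma_secuencia; infer_instance

-- ===== CLAIM (what is proved, stated in full; the proofs are below) =====
def Claim_equal_calcular_suma_secuencia : Prop := ∀ (n : Int), Dom_calcular_suma_secuencia n → Spec_calcular_suma_secuencia n (calcular_suma_secuencia n)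

-- ===== LEMMAS AND PROOFS =====

-- Loop invariant: after summing i = 1..m, the state is (S, (-2)^m) with 9·S the closed-form numerator.
theorem pv_loop_invariant (m : Nat) :
    ∃ S : Int,
      (PySem.List.pyRange 1 ((m : Int) + 1) 1).foldl
        (fun (st : Int × Int) i =>
          let termino := i * st.2
          (st.1 + termino, st.2 * (-2))) (0, 1) = (S, (-2 : Int) ^ m) ∧
      9 * S = 1 - ((m : Int) + 1) * (-2 : Int) ^ m - 2 * (m : Int) * (-2 : Int) ^ m := by
  induction m with
  | zero =>
      refine ⟨0, ?_, by ring⟩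
      rw [PySem.List.pyRange_one_eq_nil (by norm_num)]
      simp
  | succ k ih =>
      obtain ⟨S, hfold, hS⟩ := ih
      refine ⟨S + ((k : Int) + 1) * (-2 : Int) ^ k, ?_, ?_⟩
      · have hsplit : PySem.List.pyRange 1 ((k : Int) + 1 + 1) 1
            = PySem.List.pyRange 1 ((k : Int) + 1) 1 ++ [(k : Int) + 1] :=
          PySem.List.pyRange_one_succ_right (by omega)
        push_cast
        rw [hsplit, List.foldl_append, hfold]
        simp only [List.foldl_cons, List.foldl_nil, Prod.mk.injEq]
        exact ⟨trivial, by rw [pow_succ]⟩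
      · push_cast
        rw [pow_succ]
        linear_combination hS

theorem pv_floordiv_nine (k : Int) : PySem.Int.floordiv (9 * k) 9 = k := by
  simp [PySem.Int.floordiv]

-- ===== VERDICT (by name: the statement is the Claim_ definition above) =====
theorem calcular_suma_secuencia_spec : Claim_equal_calcular_suma_secuencia := by
  intro n _
  unfold Spec_calcular_suma_secuencia calcular_suma_secuencia calcular_suma_secuencia_alt
  by_cases hn : n ≤ 0
  · rw [PySem.List.pyRange_one_eq_nil (by omega)]
    simp [hn]
  · rw [not_le] at hn
    have hnn : (n.toNat : Int) = n := Int.toNat_of_nonneg (le_of_lt hn)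
    obtain ⟨S, hfold, hS⟩ := pv_loop_invariant n.toNat
    rw [hnn] at hfold hS
    simp only [if_neg (not_le.mpr hn), hfold]
    have : 1 - (n + 1) * (-2 : Int) ^ n.toNat - 2 * n * (-2 : Int) ^ n.toNat = 9 * S := by
      omega
    rw [this, pv_floordiv_nine]
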